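-- pv_equiv track=rewrite | github.com/Acreast/leetcode | 1498-NumberofSubsequencesThatSatisfytheGivenSumCondition/1498-NumberofSubsequencesThatSatisfytheGivenSumCondition.py | numSubseq
-- ===== SOURCE A (Python) =====
-- from typing import List
--
-- def numSubseq(nums: List[int], target: int) -> int:
--     nums.sort()
--     res = 0
--     r = len(nums) - 1
--     MOD = 10** 9 + 7
--     for i, l in enumerate(nums):
--         while (nums[r] + l) > target and i <= r:
--             r -= 1
--         if i <= r:
--             res += (2 ** ( r - i))
--             res %= MOD
--
--     return res
-- ===== SOURCE B (Python) =====
-- # B: sort, then for each candidate minimum binary-search the farthest valid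
-- # maximum (instead of A's two-pointer sweep), with a table of powers of 2 mod
-- # MOD; breaks early once no element can serve as a minimum. Sorts nums in place like A.
-- def numSubseq(nums, target):
--     nums.sort()
--     MOD = 10 ** 9 + 7
--     n = len(nums)
--     pow2 = [1]
--     for _ in range(n - 1):
--         pow2.append(pow2[-1] * 2 % MOD)
--     res = 0
--     for i in range(n):
--         if nums[i] * 2 > target:
--             break
--         # largest j in [i, n-1] with nums[j] <= target - nums[i] (j = i works)
--         lo, hi = i, n - 1
--         while lo < hi:
--             mid = (lo + hi + 1) // 2
--             if nums[mid] <= target - nums[i]: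
--                 lo = mid
--             else:
--                 hi = mid - 1
--         res = (res + pow2[lo - i]) % MOD
--     return res
-- ===== Notes on version B (the rewrite author's own statement) =====
-- stated objective: faster
-- what changed: Replaces A's two-pointer sweep (shared right pointer decremented across iterations, per-step unreduced big-int 2**(r-i)) with an independent binary search per candidate minimum plus a precomputed table of powers of 2 mod 1e9+7 and an early break once 2*nums[i] > target.
import Mathlib
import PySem

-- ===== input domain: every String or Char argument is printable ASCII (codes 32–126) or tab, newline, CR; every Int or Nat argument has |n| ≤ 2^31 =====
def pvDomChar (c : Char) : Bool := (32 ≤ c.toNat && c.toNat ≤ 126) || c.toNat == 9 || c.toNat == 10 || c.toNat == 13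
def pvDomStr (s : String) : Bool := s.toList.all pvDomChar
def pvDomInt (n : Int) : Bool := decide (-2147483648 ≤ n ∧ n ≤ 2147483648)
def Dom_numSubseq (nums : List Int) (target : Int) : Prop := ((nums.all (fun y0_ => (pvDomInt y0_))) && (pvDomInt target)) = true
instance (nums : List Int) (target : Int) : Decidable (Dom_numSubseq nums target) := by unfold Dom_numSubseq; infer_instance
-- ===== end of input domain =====

-- B replaces A's two-pointer sweep (shared right pointer, per-step big-int 2**(r-i))
-- with an independent binary search per candidate minimum, a precomputed table of
-- powers of 2 mod 1e9+7, and an early break (objective: faster).  Both Pythons sort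
-- nums in place; the equivalence proved here is about the RETURN value only.

-- ===== PORT A =====
-- the inner 'while (nums[r] + l) > target and i <= r: r -= 1'
def pvAWhile (s : List Int) (target l i : Int) (r : Int) : Int :=
  if h : PySem.List.pyGetD s r 0 + l > target ∧ i ≤ r then
    pvAWhile s target l i (r - 1)
  else r
termination_by (r - i + 1).toNat
decreasing_by omega

def numSubseq (nums : List Int) (target : Int) : Int :=
  let s := PySem.List.sorted nums (fun x => x) false
  let st :=
    (PySem.List.enumerate s 0).foldl
      (fun (st : Int × Int) (p : Int × Int) =>
        let r := pvAWhile s target p.2 p.1 st.2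
        if p.1 ≤ r then ((st.1 + 2 ^ (r - p.1).toNat) % (10 ^ 9 + 7), r)
        else (st.1, r))
      (0, (s.length : Int) - 1)
  st.1

-- ===== PORT B =====
-- 'pow2 = [1]; for _ in range(n - 1): pow2.append(pow2[-1] * 2 % MOD)'
def pvPowTable (MOD : Int) (n : Nat) : List Int :=
  (List.range (n - 1)).foldl
    (fun acc _ => acc ++ [PySem.List.pyGetD acc (-1) 0 * 2 % MOD]) [1]

-- 'lo, hi = i, n - 1; while lo < hi: …'
def pvBSearch (s : List Int) (t : Int) (lo hi : Int) : Int :=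
  if h : lo < hi then
    let mid := PySem.Int.floordiv (lo + hi + 1) 2
    if PySem.List.pyGetD s mid 0 ≤ t then pvBSearch s t mid hi
    else pvBSearch s t lo (mid - 1)
  else lo
termination_by (hi - lo).toNat
decreasing_by
  · have hb := PySem.Int.floordiv_two_mid_bounds (lo := lo + 1) (hi := hi) (by omega)
    rw [show lo + 1 + hi = lo + hi + 1 by ring] at hb
    omega
  · have hb := PySem.Int.floordiv_two_mid_bounds (lo := lo + 1) (hi := hi) (by omega)
    rw [show lo + 1 + hi = lo + hi + 1 by ring] at hb
    omega

-- 'for i in range(n): if nums[i] * 2 > target: break; …'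
def pvBMain (s : List Int) (target MOD : Int) (pow2 : List Int) (i : Nat) (res : Int) : Int :=
  if h : i < s.length then
    if PySem.List.pyGetD s (i : Int) 0 * 2 > target then res
    else
      pvBMain s target MOD pow2 (i + 1)
        ((res + PySem.List.pyGetD pow2
          (pvBSearch s (target - PySem.List.pyGetD s (i : Int) 0)
            (i : Int) ((s.length : Int) - 1) - (i : Int)) 0) % MOD)
  else res
termination_by s.length - i

def numSubseq_alt (nums : List Int) (target : Int) : Int :=
  let s := PySem.List.sorted nums (fun x => x) false
  let MOD : Int := 10 ^ 9 + 7
  let pow2 := pvPowTable MOD s.length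
  pvBMain s target MOD pow2 0 0

-- ===== PRECONDITION & SPEC =====
def Spec_numSubseq (nums : List Int) (target : Int) (out : Int) : Prop := out = numSubseq_alt nums target
instance (nums : List Int) (target : Int) (out : Int) : Decidable (Spec_numSubseq nums target out) := by unfold Spec_numSubseq; infer_instance

-- ===== CLAIM (what is proved, stated in full; the proofs are below) =====
def Claim_equal_numSubseq : Prop := ∀ (nums : List Int) (target : Int), Dom_numSubseq nums target → Spec_numSubseq nums target (numSubseq nums target)

-- ===== LEMMAS AND PROOFS =====

-- pyGetD at an in-range nonnegative Int index, phrased through getD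
theorem pvGetDD (s : List Int) (x : Int) (h0 : 0 ≤ x) (_h1 : x < (s.length : Int)) :
    PySem.List.pyGetD s x 0 = s.getD x.toNat 0 :=
  PySem.List.pyGetD_of_nonneg s 0 h0

-- the power table is exactly [2^0 % MOD, …, 2^m % MOD]
theorem pvPowAux (m : Nat) :
    (List.range m).foldl
      (fun acc _ => acc ++ [PySem.List.pyGetD acc (-1) 0 * 2 % (10 ^ 9 + 7)]) [1]
    = (List.range (m + 1)).map (fun k => (2 : Int) ^ k % (10 ^ 9 + 7)) := by
  induction m with
  | zero => simp [List.range_succ]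
  | succ m ih =>
    rw [List.range_succ, List.foldl_append, ih]
    simp only [List.foldl_cons, List.foldl_nil]
    rw [List.range_succ (n := m), List.map_append]
    simp only [List.map_cons, List.map_nil]
    rw [PySem.List.pyGetD_neg_one_append_singleton]
    rw [List.range_succ (n := m + 1), List.map_append, List.range_succ (n := m),
      List.map_append]
    simp only [List.map_cons, List.map_nil]
    congr 1
    simp only [List.cons.injEq, and_true]
    have h2 : (2 : Int) ^ (m + 1) = 2 ^ m * 2 := by ring
    rw [h2]
    omega

theorem pvPowGet (n k : Nat) (hk : k < n) :
    PySem.List.pyGetD (pvPowTable (10 ^ 9 + 7) n) (k : Int) 0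
      = (2 : Int) ^ k % (10 ^ 9 + 7) := by
  unfold pvPowTable
  rw [pvPowAux]
  have hm : n - 1 + 1 = n := by omega
  rw [hm, PySem.List.pyGetD_natCast]
  rw [List.getD_eq_getElem _ _ (by simpa using hk)]
  simp

-- A's inner while, run to the known answer j: it stops exactly at j
theorem pvAWhileEq (s : List Int) (target l i j : Int) :
    ∀ (r : Int), 0 ≤ i → i ≤ j → j ≤ r → r < (s.length : Int) →
    s.getD j.toNat 0 + l ≤ target →
    (∀ k : Int, j < k → k ≤ r → target < s.getD k.toNat 0 + l) →
    pvAWhile s target l i r = j := by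
  intro r h0 hij hjr hr hj hexc
  rw [pvAWhile]
  by_cases hjr' : j = r
  · subst hjr'
    rw [dif_neg]
    rw [pvGetDD s j (by omega) hr]
    omega
  · have hgt : target < s.getD r.toNat 0 + l := hexc r (by omega) le_rfl
    rw [dif_pos]
    · exact pvAWhileEq s target l i j (r - 1) h0 hij (by omega) (by omega) hj
        (fun k hk1 hk2 => hexc k hk1 (by omega))
    · constructor
      · rw [pvGetDD s r (by omega) hr]; omega
      · omega
termination_by r => (r - j).toNat
decreasing_by omega

-- A's inner while never increases r, and at its stop i ≤ r' forces validity
theorem pvAWhileStop (s : List Int) (target l i : Int) :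
    ∀ (r : Int), pvAWhile s target l i r ≤ r ∧
      (i ≤ pvAWhile s target l i r →
        PySem.List.pyGetD s (pvAWhile s target l i r) 0 + l ≤ target) := by
  intro r
  rw [pvAWhile]
  split_ifs with h
  · have := pvAWhileStop s target l i (r - 1)
    exact ⟨by omega, this.2⟩
  · exact ⟨le_rfl, fun _ => by omega⟩
termination_by r => (r - i + 1).toNat
decreasing_by omega

-- B's binary search finds the largest valid index (characterised without running A)
theorem pvBSearchSpec (s : List Int) (t : Int)
    (hm : ∀ a b : Nat, a ≤ b → b < s.length → s.getD a 0 ≤ s.getD b 0) :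
    ∀ (lo hi hi0 : Int), 0 ≤ lo → lo ≤ hi → hi ≤ hi0 → hi0 < (s.length : Int) →
    s.getD lo.toNat 0 ≤ t →
    (∀ k : Int, hi < k → k ≤ hi0 → t < s.getD k.toNat 0) →
    lo ≤ pvBSearch s t lo hi ∧ pvBSearch s t lo hi ≤ hi ∧
      s.getD (pvBSearch s t lo hi).toNat 0 ≤ t ∧
      (∀ k : Int, pvBSearch s t lo hi < k → k ≤ hi0 → t < s.getD k.toNat 0) := by
  intro lo hi hi0 h0 hlh hhh hh0 hvlo hexc
  rw [pvBSearch]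
  split_ifs with h
  · have hb := PySem.Int.floordiv_two_mid_bounds (lo := lo + 1) (hi := hi) (by omega)
    rw [show lo + 1 + hi = lo + hi + 1 by ring] at hb
    set mid := PySem.Int.floordiv (lo + hi + 1) 2 with hmid
    have hmg : PySem.List.pyGetD s mid 0 = s.getD mid.toNat 0 :=
      pvGetDD s mid (by omega) (by omega)
    by_cases hv : PySem.List.pyGetD s mid 0 ≤ t
    · rw [if_pos hv]
      have := pvBSearchSpec s t hm mid hi hi0 (by omega) (by omega) hhh hh0
        (by rw [← hmg]; exact hv) hexc
      exact ⟨by omega, this.2.1, this.2.2.1, this.2.2.2⟩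
    · rw [if_neg hv]
      have hexc' : ∀ k : Int, mid - 1 < k → k ≤ hi0 → t < s.getD k.toNat 0 := by
        intro k hk1 hk2
        by_cases hk3 : k ≤ hi
        · have : s.getD mid.toNat 0 ≤ s.getD k.toNat 0 :=
            hm mid.toNat k.toNat (by omega) (by omega)
          rw [hmg] at hv; omega
        · exact hexc k (by omega) hk2
      have := pvBSearchSpec s t hm lo (mid - 1) hi0 h0 (by omega) (by omega) hh0
        hvlo hexc'
      exact ⟨this.1, by omega, this.2.2.1, this.2.2.2⟩
  · exact ⟨le_rfl, hlh, by omega, fun k hk1 hk2 => hexc k (by omega) hk2⟩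
termination_by lo hi _ => (hi - lo).toNat
decreasing_by
  all_goals
    (have hb2 := PySem.Int.floordiv_two_mid_bounds (lo := lo + 1) (hi := hi) (by omega)
     rw [show lo + 1 + hi = lo + hi + 1 by ring] at hb2
     omega)

-- the step function of A's fold (named to keep the statements short)
def pvAStep (s : List Int) (target : Int) (st : Int × Int) (p : Int × Int) : Int × Int :=
  let r := pvAWhile s target p.2 p.1 st.2
  if p.1 ≤ r then ((st.1 + 2 ^ (r - p.1).toNat) % (10 ^ 9 + 7), r)
  else (st.1, r)

-- once 2*s[i'] > target for every remaining i', A's tail fold adds nothing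
theorem pvTail (s : List Int) (target : Int)
    (hm : ∀ a b : Nat, a ≤ b → b < s.length → s.getD a 0 ≤ s.getD b 0) :
    ∀ (i : Nat) (r res : Int), r < (s.length : Int) →
    (∀ i' : Nat, i ≤ i' → i' < s.length → target < s.getD i' 0 * 2) →
    ((PySem.List.enumerate (s.drop i) (i : Int)).foldl (pvAStep s target) (res, r)).1
      = res := by
  intro i r res hr hbig
  by_cases hi : i < s.length
  · rw [List.drop_eq_getElem_cons hi, PySem.List.enumerate_cons, List.foldl_cons]
    have hstop := pvAWhileStop s target s[i] (i : Int) r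
    set r1 := pvAWhile s target s[i] (i : Int) r with hr1
    have hnle : ¬ ((i : Int) ≤ r1) := by
      intro hle
      have hval := hstop.2 hle
      rw [pvGetDD s r1 (by omega) (by omega)] at hval
      have h1 : s.getD i 0 ≤ s.getD r1.toNat 0 := hm i r1.toNat (by omega) (by omega)
      have h2 : s.getD i 0 = s[i] := by rw [List.getD_eq_getElem _ _ hi]
      have h3 := hbig i le_rfl hi
      omega
    have hstep : pvAStep s target (res, r) ((i : Int), s[i]) = (res, r1) := by
      unfold pvAStep
      simp only [← hr1]
      rw [if_neg hnle]
    rw [hstep]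
    have ih := pvTail s target hm (i + 1) r1 res (by omega)
      (fun i' h1 h2 => hbig i' (by omega) h2)
    rw [show ((i : Int) + 1) = ((i + 1 : Nat) : Int) by push_cast; ring]
    exact ih
  · rw [List.drop_eq_nil_of_le (by omega), PySem.List.enumerate_nil, List.foldl_nil]
termination_by i => s.length - i

-- bisimulation: A's remaining fold from index i with pointer r equals B's loop at i
theorem pvMain (s : List Int) (target : Int)
    (hm : ∀ a b : Nat, a ≤ b → b < s.length → s.getD a 0 ≤ s.getD b 0) :
    ∀ (i : Nat) (r res : Int), r < (s.length : Int) →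
    (∀ k : Int, r < k → k ≤ (s.length : Int) - 1 →
      target < s.getD k.toNat 0 + s.getD i 0) →
    ((PySem.List.enumerate (s.drop i) (i : Int)).foldl (pvAStep s target) (res, r)).1
      = pvBMain s target (10 ^ 9 + 7) (pvPowTable (10 ^ 9 + 7) s.length) i res := by
  intro i r res hr hexc
  by_cases hi : i < s.length
  · rw [pvBMain, dif_pos hi]
    have hgi : PySem.List.pyGetD s (i : Int) 0 = s.getD i 0 := by
      rw [PySem.List.pyGetD_natCast]
    by_cases hbreak : PySem.List.pyGetD s (i : Int) 0 * 2 > target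
    · rw [if_pos hbreak]
      rw [hgi] at hbreak
      exact pvTail s target hm i r res hr
        (fun i' h1 h2 => by
          have := hm i i' h1 h2; omega)
    · rw [if_neg hbreak]
      rw [hgi] at hbreak
      -- the binary search
      have hbs := pvBSearchSpec s (target - PySem.List.pyGetD s (i : Int) 0) hm
        (i : Int) ((s.length : Int) - 1) ((s.length : Int) - 1)
        (by omega) (by omega) le_rfl (by omega)
        (by rw [hgi]; simp only [Int.toNat_natCast]; omega)
        (fun k hk1 hk2 => absurd hk2 (by omega))
      set j := pvBSearch s (target - PySem.List.pyGetD s (i : Int) 0)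
        (i : Int) ((s.length : Int) - 1) with hj
      rw [hgi] at hbs
      obtain ⟨hij, hjn, hjv, hjexc⟩ := hbs
      -- j ≤ r by the exclusion invariant
      have hjr : j ≤ r := by
        by_contra hc
        have := hexc j (by omega) (by omega)
        have h2 : s.getD i 0 = s[i] := by rw [List.getD_eq_getElem _ _ hi]
        omega
      -- A's while stops exactly at j
      have hAW : pvAWhile s target s[i] (i : Int) r = j := by
        apply pvAWhileEq s target s[i] (i : Int) j r (by omega) hij hjr hr
        · have h2 : s.getD i 0 = s[i] := by rw [List.getD_eq_getElem _ _ hi]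
          omega
        · intro k hk1 hk2
          have h2 : s.getD i 0 = s[i] := by rw [List.getD_eq_getElem _ _ hi]
          have := hjexc k hk1 (by omega)
          omega
      rw [List.drop_eq_getElem_cons hi, PySem.List.enumerate_cons, List.foldl_cons]
      have hstep : pvAStep s target (res, r) ((i : Int), s[i])
          = ((res + 2 ^ (j - (i : Int)).toNat) % (10 ^ 9 + 7), j) := by
        unfold pvAStep
        simp only [hAW]
        rw [if_pos hij]
      rw [hstep]
      have hpow : PySem.List.pyGetD (pvPowTable (10 ^ 9 + 7) s.length)
          (j - (i : Int)) 0 = 2 ^ (j - (i : Int)).toNat % (10 ^ 9 + 7) := by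
        have h := pvPowGet s.length (j - (i : Int)).toNat (by omega)
        rwa [Int.toNat_of_nonneg (by omega)] at h
      have ih := pvMain s target hm (i + 1) j
        ((res + 2 ^ (j - (i : Int)).toNat) % (10 ^ 9 + 7)) (by omega)
        (by
          intro k hk1 hk2
          have h1 := hjexc k hk1 hk2
          by_cases h2 : i + 1 < s.length
          · have h3 : s.getD i 0 ≤ s.getD (i + 1) 0 := hm i (i + 1) (by omega) h2
            omega
          · omega)
      rw [show ((i + 1 : Nat) : Int) = (i : Int) + 1 by push_cast; ring] at ih
      rw [ih]
      congr 1
      rw [hpow]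
      generalize (2 : Int) ^ (j - (i : Int)).toNat = c
      omega
  · rw [List.drop_eq_nil_of_le (by omega), PySem.List.enumerate_nil, List.foldl_nil,
      pvBMain, dif_neg hi]
termination_by i => s.length - i
decreasing_by all_goals omega

-- sortedness of the shared sorted list, in getD form
theorem pvSortedMono (nums : List Int) :
    ∀ a b : Nat, a ≤ b → b < (PySem.List.sorted nums (fun x => x) false).length →
      (PySem.List.sorted nums (fun x => x) false).getD a 0
        ≤ (PySem.List.sorted nums (fun x => x) false).getD b 0 := by
  intro a b hab hb
  have hp := PySem.List.sorted_pairwise (xs := nums) (key := fun x => x)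
  rw [List.pairwise_iff_getElem] at hp
  rcases Nat.lt_or_ge a b with h | h
  · have := hp a b (by omega) hb h
    rw [List.getD_eq_getElem _ _ (by omega), List.getD_eq_getElem _ _ hb]
    exact this
  · have : a = b := by omega
    subst this
    exact le_rfl

-- ===== VERDICT (by name: the statement is the Claim_ definition above) =====
theorem numSubseq_spec : Claim_equal_numSubseq := by
  intro nums target _
  unfold Spec_numSubseq numSubseq numSubseq_alt
  simp only []
  set s := PySem.List.sorted nums (fun x => x) false with hs
  have h := pvMain s target (pvSortedMono nums) 0 ((s.length : Int) - 1) 0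
    (by omega) (fun k hk1 hk2 => absurd hk2 (by omega))
  simp only [List.drop_zero, Nat.cast_zero] at h
  rw [← h]
  rfl
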